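-- pv_equiv track=rewrite | github.com/huyenpham2995/python2sre | week6/nStream/nStream.py | nStream
-- ===== SOURCE A (Python) =====
-- def nStream(l: [], N: int) -> []:
--     # invalid input
--     if N < 0 or not isinstance(N, int):
--         raise Exception("N has to be a positive integer")
--
--     #handle empty master list
--     result = []
--     if len(l) == 0:
--         for _ in range(N):
--             result.append([])
--         return result
--
--     minItems = int(len(l)/N)
--     currentIndex = 0
--     group = 0
--
--     while group < N and currentIndex < len(l):
--         result.append(l[currentIndex:currentIndex+minItems])
--         currentIndex += minItems
--         group += 1
--
--     # having lefftover
--     while currentIndex < len(l):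
--         pos = currentIndex % N
--         result[pos].append(l[currentIndex])
--         currentIndex += 1
--
--     return result
-- ===== SOURCE B (Python) =====
-- def nStream(l: [], N: int) -> []:
--     # invalid input
--     if N < 0 or not isinstance(N, int):
--         raise Exception("N has to be a positive integer")
--
--     # handle empty master list
--     if len(l) == 0:
--         return [[] for _ in range(N)]
--
--     minItems = int(len(l)/N)
--     result = [[] for _ in range(N)]
--     for i in range(len(l)):
--         g = i // minItems if minItems and i < N * minItems else i % N
--         result[g].append(l[i])
--     return result
-- ===== Notes on version B (the rewrite author's own statement) =====
-- stated objective: simpler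
-- what changed: Replaces A's two sequential while-loops (slice out N contiguous blocks, then scatter leftovers by index mod N) with a single element-indexed pass that computes each element's destination group directly (i // minItems inside the block region, i % N after it).
import Mathlib
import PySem

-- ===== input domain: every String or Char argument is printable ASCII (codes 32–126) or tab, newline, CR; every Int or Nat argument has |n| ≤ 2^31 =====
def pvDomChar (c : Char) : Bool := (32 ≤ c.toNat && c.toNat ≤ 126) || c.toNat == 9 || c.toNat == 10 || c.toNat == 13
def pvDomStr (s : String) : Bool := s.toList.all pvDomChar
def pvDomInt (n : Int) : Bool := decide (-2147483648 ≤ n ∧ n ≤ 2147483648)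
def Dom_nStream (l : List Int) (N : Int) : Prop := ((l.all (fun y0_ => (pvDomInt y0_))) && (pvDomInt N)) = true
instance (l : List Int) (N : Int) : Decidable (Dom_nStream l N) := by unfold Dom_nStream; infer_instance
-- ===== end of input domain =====

-- B replaces A's two sequential while-loops (slice N contiguous blocks, then scatter leftovers
-- by index mod N) with a single element-indexed pass computing each element's destination group.


-- ===== PORT A =====
-- result[pos].append(x)  (shared by both ports)
def pvAppendAt (res : List (List Int)) (pos : Nat) (x : Int) : List (List Int) :=
  res.modify pos (· ++ [x])

-- A's first while-loop: 'while group < N and currentIndex < len(l)'; fuel = remaining groups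
def pvSliceLoop (l : List Int) (m : Int) : Nat → Int → List (List Int) → List (List Int) × Int
  | 0, cur, res => (res, cur)
  | fuel+1, cur, res =>
    if cur < (l.length : Int) then
      pvSliceLoop l m fuel (cur + m) (res ++ [PySem.List.slice l (some cur) (some (cur + m))])
    else (res, cur)

def nStream (l : List Int) (N : Int) : List (List Int) :=
  if N < 0 then []        -- Python raises here; excluded by Pre_
  else if (l.length : Int) = 0 then List.replicate N.toNat []
  else
    -- int(len(l)/N): exact floor division for these nonnegative magnitudes
    let m := PySem.Int.floordiv (l.length : Int) N
    let st := pvSliceLoop l m N.toNat 0 []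
    -- A's second while-loop 'while currentIndex < len(l)' as a fold over the remaining indices
    (PySem.List.pyRange st.2 (l.length : Int) 1).foldl
      (fun res i => pvAppendAt res (PySem.Int.mod i N).toNat (PySem.List.pyGetD l i 0)) st.1

-- ===== PORT B =====
def nStream_alt (l : List Int) (N : Int) : List (List Int) :=
  if N < 0 then []        -- Python raises here; excluded by Pre_
  else if (l.length : Int) = 0 then List.replicate N.toNat []
  else
    let m := PySem.Int.floordiv (l.length : Int) N
    -- single pass: 'for i in range(len(l)): result[g].append(l[i])'
    (PySem.List.pyRange 0 (l.length : Int) 1).foldl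
      (fun res i =>
        let g : Int := if m ≠ 0 ∧ i < N * m then PySem.Int.floordiv i m else PySem.Int.mod i N
        pvAppendAt res g.toNat (PySem.List.pyGetD l i 0))
      (List.replicate N.toNat [])

-- ===== PRECONDITION & SPEC =====
-- Pre_ excludes exactly where Python A raises: N < 0 (explicit raise) and N = 0 with l nonempty
-- (ZeroDivisionError in int(len(l)/N)).
def Pre_nStream (l : List Int) (N : Int) : Prop := 0 ≤ N ∧ (N = 0 → l = [])
instance (l : List Int) (N : Int) : Decidable (Pre_nStream l N) := by unfold Pre_nStream; infer_instance

def pvWitness_nStream : List Int × Int := ([1, 2, 3, 4, 5], 2)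

def Spec_nStream (l : List Int) (N : Int) (out : List (List Int)) : Prop := out = nStream_alt l N
instance (l : List Int) (N : Int) (out : List (List Int)) : Decidable (Spec_nStream l N out) := by unfold Spec_nStream; infer_instance

-- ===== CLAIM (what is proved, stated in full; the proofs are below) =====
def Claim_equal_nStream : Prop := ∀ (l : List Int) (N : Int), Dom_nStream l N → Pre_nStream l N → Spec_nStream l N (nStream l N)

-- ===== LEMMAS AND PROOFS =====

theorem pv_length_appendAt (res : List (List Int)) (p : Nat) (x : Int) :
    (pvAppendAt res p x).length = res.length := by
  simp [pvAppendAt]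

theorem pv_getD_appendAt (res : List (List Int)) (p : Nat) (x : Int) (j : Nat)
    (hp : p < res.length) :
    (pvAppendAt res p x).getD j [] =
      if p = j then res.getD j [] ++ [x] else res.getD j [] := by
  simp only [pvAppendAt, List.getD, List.getElem?_modify]
  cases h : res[j]? with
  | none =>
    have hj : ¬ j < res.length := by
      intro hc; exact absurd (List.getElem?_eq_getElem hc) (by simp [h])
    have hpj : ¬ p = j := by omega
    simp [hpj]
  | some a =>
    by_cases hpj : p = j <;> simp [hpj]

theorem pv_length_foldl_appendAt (g : Int → Nat) (v : Int → Int) :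
    ∀ (is : List Int) (res : List (List Int)),
      (is.foldl (fun r i => pvAppendAt r (g i) (v i)) res).length = res.length := by
  intro is
  induction is with
  | nil => intro res; rfl
  | cons i is ih => intro res; simpa [pv_length_appendAt] using ih (pvAppendAt res (g i) (v i))

theorem pv_getD_foldl_appendAt (g : Int → Nat) (v : Int → Int) :
    ∀ (is : List Int) (res : List (List Int)) (j : Nat),
      (∀ i ∈ is, g i < res.length) →
      (is.foldl (fun r i => pvAppendAt r (g i) (v i)) res).getD j [] =
        res.getD j [] ++ (is.filter (fun i => g i == j)).map v := by
  intro is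
  induction is with
  | nil => intro res j _; simp
  | cons i is ih =>
    intro res j hg
    have hlen : (pvAppendAt res (g i) (v i)).length = res.length := pv_length_appendAt ..
    have hrec := ih (pvAppendAt res (g i) (v i)) j
      (by intro i' hi'; rw [hlen]; exact hg i' (List.mem_cons_of_mem _ hi'))
    simp only [List.foldl_cons]
    rw [hrec, pv_getD_appendAt _ _ _ _ (hg i (List.mem_cons_self ..))]
    by_cases hij : g i = j
    · simp [hij]
    · simp [hij]

-- A's first loop returns the N contiguous slices and currentIndex = N*minItems.
theorem pv_sliceLoop_eq (l : List Int) (m : Int) :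
    ∀ (f : Nat) (cur : Int) (res : List (List Int)),
      (∀ k : Nat, k < f → cur + (k : Int) * m < (l.length : Int)) →
      pvSliceLoop l m f cur res =
        (res ++ (List.range f).map
            (fun k : Nat => PySem.List.slice l (some (cur + (k : Int) * m)) (some (cur + (k : Int) * m + m))),
         cur + (f : Int) * m) := by
  intro f
  induction f with
  | zero => intro cur res _; simp [pvSliceLoop]
  | succ f ih =>
    intro cur res h
    have h0 : cur < (l.length : Int) := by simpa using h 0 (Nat.succ_pos f)
    rw [pvSliceLoop, if_pos h0,
      ih (cur + m) _ (by intro k hk; have := h (k+1) (by omega); push_cast at this ⊢; linarith)]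
    refine Prod.ext_iff.mpr ⟨?_, ?_⟩
    · show res ++ [_] ++ _ = res ++ _
      rw [List.append_assoc]
      congr 1
      rw [List.range_succ_eq_map, List.map_cons, List.map_map, List.singleton_append]
      congr 1
      · norm_num
      · apply List.map_congr_left
        intro a _
        simp only [Function.comp_apply]
        rw [show cur + m + (a : Int) * m = cur + ((a : Int) + 1) * m from by ring]
        norm_cast
    · show cur + m + (f : Int) * m = cur + ((f : Nat) + 1 : Int) * m
      ring

-- the values appended over a subrange of indices form a slice of l
theorem pv_map_getD_range (l : List Int) (a k : Nat) (hak : a + k ≤ l.length) :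
    (PySem.List.pyRange (a : Int) ((a : Int) + (k : Int)) 1).map
        (fun i => PySem.List.pyGetD l i 0) = (l.drop a).take k := by
  rw [PySem.List.pyRange_one]
  have hk : (((a : Int) + (k : Int)) - (a : Int)).toNat = k := by omega
  rw [hk]
  apply List.ext_getElem
  · simp; omega
  · intro t h1 h2
    simp only [List.getElem_map, List.getElem_range, List.getElem_take, List.getElem_drop]
    have hc : (a : Int) + (t : Int) = ((a + t : Nat) : Int) := by push_cast; ring
    rw [hc, PySem.List.pyGetD_natCast]
    have hlt : a + t < l.length := by simp at h1; omega
    simp [List.getD, List.getElem?_eq_getElem hlt]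

-- the two fold step functions, named for readability of the main proof
def pvStepA (N : Int) (i : Int) : Nat := (PySem.Int.mod i N).toNat

def pvStepB (N m i : Int) : Nat :=
  (if m ≠ 0 ∧ i < N * m then PySem.Int.floordiv i m else PySem.Int.mod i N).toNat

theorem pv_main (l : List Int) (N : Int) (hNpos : 0 < N) (hl : 0 < l.length) :
    nStream l N = nStream_alt l N := by
  have hNcast : ((N.toNat : Nat) : Int) = N := Int.toNat_of_nonneg hNpos.le
  set n := N.toNat with hn
  have hn1 : 1 ≤ n := by omega
  set L := l.length with hLdef
  set mN := L / n with hmdef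
  have hmcast : PySem.Int.floordiv (L : Int) N = ((mN : Nat) : Int) := by
    rw [← hNcast]; exact_mod_cast PySem.Int.floordiv_natCast L n
  have hnm_le : n * mN ≤ L := by
    have h := Nat.div_mul_le_self L n
    calc n * mN = mN * n := Nat.mul_comm ..
    _ ≤ L := h
  have kbound : ∀ k : Nat, k < n → k * mN < L := by
    intro k hk
    rcases Nat.eq_zero_or_pos mN with h | h
    · simpa [h] using hl
    · have h1 : (k + 1) * mN ≤ n * mN := Nat.mul_le_mul_right _ (by omega)
      have h2 : k * mN + mN = (k + 1) * mN := by ring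
      omega
  have hN0 : ¬ N < 0 := by omega
  clear_value n L mN
  have hL0 : ¬ ((L : Int) = 0) := by exact_mod_cast Nat.pos_iff_ne_zero.mp hl
  -- characterize A
  have hsl := pv_sliceLoop_eq l ((mN : Nat) : Int) n 0 []
    (by intro k hk
        have hkb := kbound k hk
        have hc : (0:Int) + (k : Int) * ((mN : Nat) : Int) = ((k * mN : Nat) : Int) := by
          push_cast; ring
        rw [hc, ← hLdef]; exact_mod_cast hkb)
  have hA : nStream l N =
      (PySem.List.pyRange ((n * mN : Nat) : Int) (L : Int) 1).foldl
        (fun res i => pvAppendAt res (pvStepA N i) (PySem.List.pyGetD l i 0))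
        ((List.range n).map (fun k => (l.drop (k * mN)).take mN)) := by
    simp only [nStream, if_neg hN0, if_neg hL0, hmcast, ← hLdef, ← hn, hsl]
    have e1 : (0 : Int) + (n : Int) * ((mN : Nat) : Int) = ((n * mN : Nat) : Int) := by
      push_cast; ring
    have e2 : (List.range n).map
          (fun k : Nat => PySem.List.slice l (some ((0:Int) + (k : Int) * ((mN : Nat) : Int)))
            (some ((0:Int) + (k : Int) * ((mN : Nat) : Int) + ((mN : Nat) : Int)))) =
        (List.range n).map (fun k => (l.drop (k * mN)).take mN) := by
      apply List.map_congr_left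
      intro k _
      have e3 : (0:Int) + (k : Int) * ((mN : Nat) : Int) = ((k * mN : Nat) : Int) := by
        push_cast; ring
      rw [e3, PySem.List.slice_natCast_add]
    rw [e1, e2]
    rfl
  -- characterize B
  have hB : nStream_alt l N =
      (PySem.List.pyRange 0 (L : Int) 1).foldl
        (fun res i => pvAppendAt res (pvStepB N ((mN : Nat) : Int) i) (PySem.List.pyGetD l i 0))
        (List.replicate n []) := by
    simp only [nStream_alt, if_neg hN0, if_neg hL0, hmcast, ← hLdef, ← hn]
    rfl
  -- bounds for the two step functions
  have hbA : ∀ i ∈ PySem.List.pyRange ((n * mN : Nat) : Int) (L : Int) 1,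
      pvStepA N i < ((List.range n).map (fun k => (l.drop (k * mN)).take mN)).length := by
    intro i hi
    have h1 : PySem.Int.mod i N < N := PySem.Int.mod_lt i hNpos
    have h2 : 0 ≤ PySem.Int.mod i N := PySem.Int.mod_nonneg i hNpos
    simp only [List.length_map, List.length_range, pvStepA]
    omega
  have hbB : ∀ i ∈ PySem.List.pyRange 0 (L : Int) 1,
      pvStepB N ((mN : Nat) : Int) i < (List.replicate (n := n) (a := ([] : List Int))).length := by
    intro i hi
    have hmem := (PySem.List.mem_pyRange_one).mp hi
    simp only [List.length_replicate, pvStepB]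
    split
    · rename_i hc
      have hm0 : (0 : Int) < ((mN : Nat) : Int) := by
        rcases hc with ⟨h1, _⟩; omega
      have h1 : PySem.Int.floordiv i ((mN : Nat) : Int) < N :=
        (PySem.Int.floordiv_lt_iff_lt_mul hm0).mpr hc.2
      have h2 : 0 ≤ PySem.Int.floordiv i ((mN : Nat) : Int) :=
        (PySem.Int.le_floordiv_iff_mul_le hm0).mpr (by simpa using hmem.1)
      omega
    · have h1 : PySem.Int.mod i N < N := PySem.Int.mod_lt i hNpos
      have h2 : 0 ≤ PySem.Int.mod i N := PySem.Int.mod_nonneg i hNpos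
      omega
  -- lengths
  have hlenA : (nStream l N).length = n := by
    rw [hA, pv_length_foldl_appendAt]; simp
  have hlenB : (nStream_alt l N).length = n := by
    rw [hB, pv_length_foldl_appendAt]; simp
  -- extensional equality
  apply List.ext_getElem (by omega)
  intro j hj1 hj2
  have hjn : j < n := by omega
  -- cast bookkeeping: products of Nat casts as casts of Nat products
  have cN : N * ((mN : Nat) : Int) = ((n * mN : Nat) : Int) := by rw [← hNcast]; push_cast; ring
  have cJ : (j : Int) * ((mN : Nat) : Int) = ((j * mN : Nat) : Int) := by push_cast; ring
  have cJ1 : ((j : Int) + 1) * ((mN : Nat) : Int) = (((j + 1) * mN : Nat) : Int) := by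
    push_cast; ring
  have nJ1 : (j + 1) * mN ≤ n * mN := Nat.mul_le_mul_right _ (by omega)
  have nJJ1 : j * mN + mN = (j + 1) * mN := by ring
  rw [← List.getD_eq_getElem _ [] hj1, ← List.getD_eq_getElem _ [] hj2]
  rw [hA, hB, pv_getD_foldl_appendAt _ _ _ _ _ hbA, pv_getD_foldl_appendAt _ _ _ _ _ hbB]
  have hstartA : ((List.range n).map (fun k => (l.drop (k * mN)).take mN)).getD j [] =
      (l.drop (j * mN)).take mN := by
    rw [List.getD_eq_getElem _ [] (by simpa using hjn)]
    simp
  have hstartB : (List.replicate (n := n) (a := ([] : List Int))).getD j [] = [] := by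
    rw [List.getD_eq_getElem _ [] (by simpa using hjn)]
    simp
  rw [hstartA, hstartB]
  -- split B's range at n*mN
  have hsplit : PySem.List.pyRange 0 (L : Int) 1 =
      PySem.List.pyRange 0 ((n * mN : Nat) : Int) 1 ++
        PySem.List.pyRange ((n * mN : Nat) : Int) (L : Int) 1 :=
    PySem.List.pyRange_one_append _ _ _ (by positivity) (by exact_mod_cast hnm_le)
  rw [hsplit, List.filter_append, List.map_append]
  -- on the tail the two step functions agree
  have htail : (PySem.List.pyRange ((n * mN : Nat) : Int) (L : Int) 1).filter
        (fun i => pvStepB N ((mN : Nat) : Int) i == j) =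
      (PySem.List.pyRange ((n * mN : Nat) : Int) (L : Int) 1).filter
        (fun i => pvStepA N i == j) := by
    apply List.filter_congr
    intro i hi
    have hmem := (PySem.List.mem_pyRange_one).mp hi
    have hNm : ¬ (((mN : Nat) : Int) ≠ 0 ∧ i < N * ((mN : Nat) : Int)) := by
      rintro ⟨-, hlt⟩
      rw [cN] at hlt
      omega
    simp only [pvStepB, pvStepA, if_neg hNm]
  rw [htail]
  -- on the head B's filter picks out exactly the j-th block
  have hhead : ((PySem.List.pyRange 0 ((n * mN : Nat) : Int) 1).filter
        (fun i => pvStepB N ((mN : Nat) : Int) i == j)).map (fun i => PySem.List.pyGetD l i 0) =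
      (l.drop (j * mN)).take mN := by
    rcases Nat.eq_zero_or_pos mN with hm0 | hm0
    · simp [hm0, PySem.List.pyRange_one_eq_nil]
    · have hmI : (0 : Int) < ((mN : Nat) : Int) := by exact_mod_cast hm0
      have hsp1 : PySem.List.pyRange 0 ((n * mN : Nat) : Int) 1 =
          PySem.List.pyRange 0 ((j * mN : Nat) : Int) 1 ++
            (PySem.List.pyRange ((j * mN : Nat) : Int) (((j + 1) * mN : Nat) : Int) 1 ++
              PySem.List.pyRange (((j + 1) * mN : Nat) : Int) ((n * mN : Nat) : Int) 1) := by
        rw [← PySem.List.pyRange_one_append ((j * mN : Nat) : Int) (((j + 1) * mN : Nat) : Int)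
            ((n * mN : Nat) : Int) (by exact_mod_cast Nat.le.intro nJJ1) (by exact_mod_cast nJ1)]
        exact PySem.List.pyRange_one_append _ _ _ (by positivity)
          (by exact_mod_cast Nat.le_trans (Nat.le.intro nJJ1) nJ1)
      rw [hsp1, List.filter_append, List.filter_append]
      have inBlock : ∀ i : Int, 0 ≤ i → i < ((n * mN : Nat) : Int) →
          pvStepB N ((mN : Nat) : Int) i = (PySem.Int.floordiv i ((mN : Nat) : Int)).toNat := by
        intro i h0 h1
        simp only [pvStepB, if_pos (show ((mN : Nat) : Int) ≠ 0 ∧ i < N * ((mN : Nat) : Int) from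
          ⟨by omega, by rw [cN]; omega⟩)]
      have hf1 : (PySem.List.pyRange 0 ((j * mN : Nat) : Int) 1).filter
          (fun i => pvStepB N ((mN : Nat) : Int) i == j) = [] := by
        apply List.filter_eq_nil_iff.mpr
        intro i hi
        have hmem := (PySem.List.mem_pyRange_one).mp hi
        have hup : (j * mN : Nat) ≤ (n * mN : Nat) := Nat.le_trans (Nat.le.intro nJJ1) nJ1
        have hupI : ((j * mN : Nat) : Int) ≤ ((n * mN : Nat) : Int) := by exact_mod_cast hup
        rw [inBlock i hmem.1 (by omega)]
        have hlt : PySem.Int.floordiv i ((mN : Nat) : Int) < (j : Int) := by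
          apply (PySem.Int.floordiv_lt_iff_lt_mul hmI).mpr
          rw [cJ]; omega
        have hge : 0 ≤ PySem.Int.floordiv i ((mN : Nat) : Int) :=
          (PySem.Int.le_floordiv_iff_mul_le hmI).mpr (by simpa using hmem.1)
        simp only [beq_iff_eq]
        omega
      have hf2 : (PySem.List.pyRange ((j * mN : Nat) : Int) (((j + 1) * mN : Nat) : Int) 1).filter
          (fun i => pvStepB N ((mN : Nat) : Int) i == j) =
          PySem.List.pyRange ((j * mN : Nat) : Int) (((j + 1) * mN : Nat) : Int) 1 := by
        apply List.filter_eq_self.mpr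
        intro i hi
        have hmem := (PySem.List.mem_pyRange_one).mp hi
        have hj0 : (0 : Int) ≤ ((j * mN : Nat) : Int) := by positivity
        have hupI : (((j + 1) * mN : Nat) : Int) ≤ ((n * mN : Nat) : Int) := by exact_mod_cast nJ1
        rw [inBlock i (by omega) (by omega)]
        have heq : PySem.Int.floordiv i ((mN : Nat) : Int) = (j : Int) := by
          apply (PySem.Int.floordiv_eq_iff_of_pos hmI).mpr
          exact ⟨by rw [cJ]; omega, by rw [cJ1]; omega⟩
        simp [heq]
      have hf3 : (PySem.List.pyRange (((j + 1) * mN : Nat) : Int) ((n * mN : Nat) : Int) 1).filter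
          (fun i => pvStepB N ((mN : Nat) : Int) i == j) = [] := by
        apply List.filter_eq_nil_iff.mpr
        intro i hi
        have hmem := (PySem.List.mem_pyRange_one).mp hi
        have hj0 : (0 : Int) ≤ (((j + 1) * mN : Nat) : Int) := by positivity
        rw [inBlock i (by omega) (by omega)]
        have hge : ((j : Int) + 1) ≤ PySem.Int.floordiv i ((mN : Nat) : Int) := by
          apply (PySem.Int.le_floordiv_iff_mul_le hmI).mpr
          rw [cJ1]; omega
        simp only [beq_iff_eq]
        omega
      rw [hf1, hf2, hf3]
      simp only [List.nil_append, List.append_nil]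
      have hrange : PySem.List.pyRange ((j * mN : Nat) : Int) (((j + 1) * mN : Nat) : Int) 1 =
          PySem.List.pyRange ((j * mN : Nat) : Int) (((j * mN : Nat) : Int) + ((mN : Nat) : Int)) 1 := by
        congr 1
        push_cast; ring
      rw [hrange]
      exact pv_map_getD_range l (j * mN) mN (by omega)
  rw [hhead]
  simp

-- ===== VERDICT (by name: the statement is the Claim_ definition above) =====
theorem nStream_spec : Claim_equal_nStream := by
  intro l N _ hPre
  unfold Spec_nStream
  rcases hPre with ⟨hN, hN0⟩
  rcases lt_or_eq_of_le hN with hpos | hzero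
  · rcases Nat.eq_zero_or_pos l.length with hL | hL
    · have hnil : l = [] := List.eq_nil_of_length_eq_zero hL
      subst hnil
      simp [nStream, nStream_alt]
    · exact pv_main l N hpos hL
  · have hnil : l = [] := hN0 hzero.symm
    subst hnil
    simp [nStream, nStream_alt]
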